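-- pv_equiv track=rewrite | github.com/vguerraz/ST0247-002 | laboratorios/lab04/ejercicioEnLinea/ejercicioEnLinea.py | rutas
-- ===== SOURCE A (Python) =====
-- def rutas(mañana : list, tarde : list, limite : int, valor : int):
--   mañana.sort()
--   tarde.sort()
--   horasextra = 0
--   for i in range (0, len(mañana)):
--     tiempo = max(mañana)+min(tarde)
--     horasextra += (tiempo-limite)
--     mañana.remove(max(mañana))
--     tarde.remove(min(tarde))
--
--   valorAPagar = horasextra * valor
--   return valorAPagar
-- ===== SOURCE B (Python) =====
-- def rutas(mañana, tarde, limite, valor):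
--     k = len(mañana)
--     extra = sum(mañana) + sum(sorted(tarde)[:k]) - k * limite
--     return extra * valor
-- ===== Notes on version B (the rewrite author's own statement) =====
-- stated objective: faster
-- what changed: Replaces the quadratic loop of repeated max/min/remove with a single closed-form sum: sum(mañana) + sum of the len(mañana) smallest tarde values - k*limite, times valor; B also does not mutate its list arguments.
import Mathlib
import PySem

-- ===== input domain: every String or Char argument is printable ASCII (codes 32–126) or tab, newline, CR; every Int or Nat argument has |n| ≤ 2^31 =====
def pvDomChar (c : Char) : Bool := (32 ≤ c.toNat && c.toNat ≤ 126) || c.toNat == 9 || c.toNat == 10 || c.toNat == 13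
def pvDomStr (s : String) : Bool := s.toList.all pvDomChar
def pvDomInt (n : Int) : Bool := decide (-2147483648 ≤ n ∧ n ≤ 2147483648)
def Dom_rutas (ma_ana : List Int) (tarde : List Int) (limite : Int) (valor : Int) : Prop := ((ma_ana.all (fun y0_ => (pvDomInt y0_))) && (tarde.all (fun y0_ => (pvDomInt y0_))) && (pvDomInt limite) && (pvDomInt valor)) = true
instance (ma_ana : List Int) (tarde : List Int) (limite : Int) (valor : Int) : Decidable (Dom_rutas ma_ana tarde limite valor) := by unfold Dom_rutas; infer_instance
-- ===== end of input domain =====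

-- B replaces A's quadratic repeated max/min/remove loop with a closed-form sum (faster, O(n log n)).
-- A mutates its list arguments in place (sorts them, empties mañana, removes from tarde); B does not.
-- The equivalence proved here is about the RETURN value only.

-- ===== PORT A =====
-- the for-loop: n iterations over the state (mañana, tarde, horasextra);
-- max()/min() on an empty list raise in Python (excluded by Pre_); the `.getD`/fallback
-- branches are unreachable under Pre_ and only make the function total.
def rutasLoop (limite : Int) : Nat → List Int → List Int → Int → Int
  | 0, _, _, acc => acc
  | n + 1, m, t, acc =>
    match PySem.List.max? m (fun x => x), PySem.List.min? t (fun x => x) with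
    | some mx, some mn =>
        rutasLoop limite n ((PySem.List.remove? m mx).getD m)
          ((PySem.List.remove? t mn).getD t) (acc + (mx + mn - limite))
    | _, _ => acc

def rutas (ma_ana : List Int) (tarde : List Int) (limite : Int) (valor : Int) : Int :=
  let m := PySem.List.sorted ma_ana (fun x => x) false
  let t := PySem.List.sorted tarde (fun x => x) false
  let horasextra := rutasLoop limite m.length m t 0
  horasextra * valor

-- ===== PORT B =====
-- sorted(tarde)[:k] with k = len(mañana) ≥ 0 is List.take k
def rutas_alt (ma_ana : List Int) (tarde : List Int) (limite : Int) (valor : Int) : Int :=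
  let k := ma_ana.length
  let extra := ma_ana.sum + ((PySem.List.sorted tarde (fun x => x) false).take k).sum - k * limite
  extra * valor

-- ===== PRECONDITION & SPEC =====
-- A raises ValueError (min of an empty list) when len(mañana) > len(tarde); exactly those inputs are excluded.
def Pre_rutas (ma_ana : List Int) (tarde : List Int) (limite : Int) (valor : Int) : Prop :=
  ma_ana.length ≤ tarde.length
instance (ma_ana : List Int) (tarde : List Int) (limite : Int) (valor : Int) : Decidable (Pre_rutas ma_ana tarde limite valor) := by unfold Pre_rutas; infer_instance
def pvWitness_rutas : List Int × List Int × Int × Int := ([3, 1], [2, 5, 4], 4, 10)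

def Spec_rutas (ma_ana : List Int) (tarde : List Int) (limite : Int) (valor : Int) (out : Int) : Prop := out = rutas_alt ma_ana tarde limite valor
instance (ma_ana : List Int) (tarde : List Int) (limite : Int) (valor : Int) (out : Int) : Decidable (Spec_rutas ma_ana tarde limite valor out) := by unfold Spec_rutas; infer_instance

-- ===== CLAIM (what is proved, stated in full; the proofs are below) =====
def Claim_equal_rutas : Prop := ∀ (ma_ana : List Int) (tarde : List Int) (limite : Int) (valor : Int), Dom_rutas ma_ana tarde limite valor → Pre_rutas ma_ana tarde limite valor → Spec_rutas ma_ana tarde limite valor (rutas ma_ana tarde limite valor)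

-- ===== LEMMAS AND PROOFS =====

theorem foldl_min_eq_self {h : Int} {ts : List Int} (hle : ∀ y ∈ ts, h ≤ y) :
    ts.foldl min h = h := by
  induction ts with
  | nil => rfl
  | cons a l ih =>
      have h1 : h ≤ a := hle a (by simp)
      simp only [List.foldl_cons, min_eq_left h1]
      exact ih fun y hy => hle y (by simp [hy])

theorem min?_of_sorted_cons {h : Int} {ts : List Int}
    (hp : (h :: ts).Pairwise (fun a b => a ≤ b)) :
    PySem.List.min? (h :: ts) (fun x => x) = some h := by
  rw [PySem.List.min?_id_cons]
  exact congrArg some (foldl_min_eq_self (List.pairwise_cons.mp hp).1)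

theorem rutasLoop_eq (limite : Int) :
    ∀ (n : Nat) (m t : List Int) (acc : Int), m.length = n →
      t.Pairwise (fun a b => a ≤ b) → n ≤ t.length →
      rutasLoop limite n m t acc = acc + m.sum + (t.take n).sum - n * limite := by
  intro n
  induction n with
  | zero =>
      intro m t acc hm _ _
      have : m = [] := List.length_eq_zero_iff.mp hm
      simp [rutasLoop, this]
  | succ n ih =>
      intro m t acc hm hp hlen
      cases t with
      | nil => simp at hlen
      | cons h ts =>
        have hmne : m ≠ [] := by intro e; simp [e] at hm
        obtain ⟨mx, hmx⟩ : ∃ mx, PySem.List.max? m (fun x => x) = some mx := by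
          cases hx : PySem.List.max? m (fun x => x) with
          | none => exact absurd ((PySem.List.max?_eq_none_iff m (fun x => x)).mp hx) hmne
          | some v => exact ⟨v, rfl⟩
        have hmem : mx ∈ m := PySem.List.max?_mem hmx
        have hrm : PySem.List.remove? m mx = some (m.erase mx) :=
          PySem.List.remove?_eq_some_erase m mx hmem
        have hmin : PySem.List.min? (h :: ts) (fun x => x) = some h := min?_of_sorted_cons hp
        have hrt : PySem.List.remove? (h :: ts) h = some ts := PySem.List.remove?_cons_self h ts
        have hperm : List.Perm m (mx :: m.erase mx) := List.perm_cons_erase hmem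
        have hsum : m.sum = mx + (m.erase mx).sum := by
          have := hperm.sum_eq; simpa using this
        have hlen' : (m.erase mx).length = n := by
          have := hperm.length_eq; simp at this; omega
        have hstep := ih (m.erase mx) ts (acc + (mx + h - limite)) hlen'
          (List.pairwise_cons.mp hp).2 (by simp at hlen; omega)
        simp only [rutasLoop, hmx, hmin, hrm, hrt, Option.getD_some]
        rw [hstep]
        simp only [List.take_succ_cons, List.sum_cons]
        push_cast
        linarith [hsum]

theorem rutas_spec : Claim_equal_rutas := by
  intro ma_ana tarde limite valor _ hpre
  simp only [Spec_rutas, rutas, rutas_alt]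
  have hperm := PySem.List.sorted_perm ma_ana (fun x => x) false
  have hlen : (PySem.List.sorted ma_ana (fun x => x) false).length = ma_ana.length :=
    hperm.length_eq
  have hlent : (PySem.List.sorted tarde (fun x => x) false).length = tarde.length :=
    (PySem.List.sorted_perm tarde (fun x => x) false).length_eq
  rw [rutasLoop_eq limite (PySem.List.sorted ma_ana (fun x => x) false).length
      _ _ 0 rfl (PySem.List.sorted_pairwise tarde (fun x => x)) (by rw [hlen, hlent]; exact hpre)]
  rw [hperm.sum_eq, hlen]
  ring
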